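-- pv_equiv track=rewrite | github.com/Clean-Code0244/PythonCodeStepByStepSolutions | PythonCodeStepByStep/strings/same_dashes.py | same_dashes
-- ===== SOURCE A (Python) =====
-- def same_dashes(str1, str2):
--     if str1.count('-') != str2.count('-'):
--         return False
--     for i in range(min(len(str1), len(str2))):
--         if str1[i] == '-' or str2[i] == '-':
--             if (str1[i] != str2[i]):
--                 return False
--     return True
-- ===== SOURCE B (Python) =====
-- def same_dashes(str1, str2):
--     pos1 = [i for i, c in enumerate(str1) if c == '-']
--     pos2 = [i for i, c in enumerate(str2) if c == '-']
--     return pos1 == pos2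
-- ===== Notes on version B (the rewrite author's own statement) =====
-- stated objective: simpler
-- what changed: B gathers the dash positions of each string with enumerate and returns one list equality, replacing A's separate count comparison plus an indexed scan over the common prefix.
import Mathlib
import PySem

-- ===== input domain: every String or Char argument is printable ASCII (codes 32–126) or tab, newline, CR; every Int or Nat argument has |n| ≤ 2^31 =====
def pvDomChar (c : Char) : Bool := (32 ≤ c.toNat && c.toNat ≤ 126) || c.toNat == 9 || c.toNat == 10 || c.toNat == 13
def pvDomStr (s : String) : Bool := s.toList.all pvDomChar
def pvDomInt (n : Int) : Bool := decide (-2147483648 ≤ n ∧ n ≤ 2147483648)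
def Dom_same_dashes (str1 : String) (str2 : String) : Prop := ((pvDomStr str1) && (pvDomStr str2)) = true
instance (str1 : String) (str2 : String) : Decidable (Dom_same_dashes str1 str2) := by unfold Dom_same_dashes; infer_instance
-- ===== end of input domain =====

-- B gathers the dash positions of each string and compares the two position
-- lists, replacing A's count comparison plus indexed prefix scan (objective: simpler).

-- ===== PORT A =====
-- the 'for i in range(min(len,len))' loop with its two early-return tests; every index
-- drawn from that range is in range for both strings, so pyGetD's default ' ' is never used
def sdLoopA (l1 l2 : List Char) : List Int → Bool
  | [] => true
  | i :: rest =>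
    if PySem.List.pyGetD l1 i ' ' = '-' ∨ PySem.List.pyGetD l2 i ' ' = '-' then
      if PySem.List.pyGetD l1 i ' ' ≠ PySem.List.pyGetD l2 i ' ' then false
      else sdLoopA l1 l2 rest
    else sdLoopA l1 l2 rest

def same_dashes (str1 : String) (str2 : String) : Bool :=
  if PySem.Str.count str1 "-" ≠ PySem.Str.count str2 "-" then false
  else sdLoopA str1.toList str2.toList
        (PySem.List.pyRange 0 (min (PySem.Str.len str1) (PySem.Str.len str2)) 1)

-- ===== PORT B =====
-- [i for i, c in enumerate(s) if c == '-']
def dashPositions (s : String) : List Int :=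
  ((PySem.List.enumerate s.toList 0).filter (fun p => p.2 = '-')).map (·.1)

def same_dashes_alt (str1 : String) (str2 : String) : Bool :=
  dashPositions str1 == dashPositions str2

-- ===== PRECONDITION & SPEC =====
def Spec_same_dashes (str1 : String) (str2 : String) (out : Bool) : Prop := out = same_dashes_alt str1 str2
instance (str1 : String) (str2 : String) (out : Bool) : Decidable (Spec_same_dashes str1 str2 out) := by unfold Spec_same_dashes; infer_instance

-- ===== CLAIM (what is proved, stated in full; the proofs are below) =====
def Claim_equal_same_dashes : Prop := ∀ (str1 : String) (str2 : String), Dom_same_dashes str1 str2 → Spec_same_dashes str1 str2 (same_dashes str1 str2)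

-- ===== LEMMAS AND PROOFS =====

-- PySem.Chars.count with a single-character needle counts that character
theorem countGo_single (c : Char) : ∀ (n : Nat) (l : List Char) (acc : Nat), l.length ≤ n →
    PySem.Chars.count.go [c] n l acc = acc + l.count c := by
  intro n
  induction n with
  | zero => intro l acc h; rw [PySem.Chars.count.go.eq_1]; simp at h; simp [h]
  | succ m ih =>
    intro l acc h
    cases l with
    | nil => rw [PySem.Chars.count.go.eq_2] <;> simp
    | cons a t =>
      have ht : t.length ≤ m := by simp at h; omega
      simp only [PySem.Chars.count.go]
      by_cases hc : c = a
      · subst hc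
        simp [List.isPrefixOf, ih t (acc+1) ht]
        omega
      · simp [List.isPrefixOf, Ne.symm hc, hc, ih t _ ht]

theorem count_single (c : Char) (l : List Char) : PySem.Chars.count l [c] = l.count c := by
  rw [PySem.Chars.count.eq_def]
  simp [countGo_single c l.length l 0 le_rfl]

-- positions lists, parametrised by the enumerate start
def posFrom (s : Int) (l : List Char) : List Int :=
  ((PySem.List.enumerate l s).filter (fun p => p.2 = '-')).map (·.1)

theorem posFrom_nil (s : Int) : posFrom s [] = [] := by
  simp [posFrom, PySem.List.enumerate_nil]

theorem posFrom_cons (s : Int) (b : Char) (t : List Char) :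
    posFrom s (b :: t) = (if b = '-' then [s] else []) ++ posFrom (s+1) t := by
  simp only [posFrom, PySem.List.enumerate_cons, List.filter_cons]
  split_ifs with h1 h2 h3 <;> simp_all

theorem mem_posFrom_ge (x s : Int) (l : List Char) (h : x ∈ posFrom s l) : s ≤ x := by
  induction l generalizing s with
  | nil => rw [posFrom_nil] at h; simp at h
  | cons b t ih =>
    rw [posFrom_cons] at h
    rcases List.mem_append.1 h with h1 | h2
    · split_ifs at h1 <;> simp at h1; omega
    · have := ih (s+1) h2; omega

theorem posFrom_eq_nil_iff (s : Int) (l : List Char) :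
    posFrom s l = [] ↔ l.count '-' = 0 := by
  induction l generalizing s with
  | nil => simp [posFrom_nil]
  | cons b t ih =>
    rw [posFrom_cons, List.count_cons]
    by_cases hb : b = '-' <;> simp [hb, ih (s+1)]

-- the key induction: A's combined test characterises equality of the position lists
theorem key (l1 : List Char) : ∀ (l2 : List Char) (s : Int),
    posFrom s l1 = posFrom s l2
      ↔ (l1.count '-' = l2.count '-' ∧ ∀ p ∈ l1.zip l2, ((p.1 = '-') ↔ (p.2 = '-'))) := by
  induction l1 with
  | nil =>
    intro l2 s
    rw [posFrom_nil]
    simp [eq_comm (a := ([] : List Int)), posFrom_eq_nil_iff, eq_comm (a := (0 : Nat))]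
  | cons a t1 ih =>
    intro l2 s
    cases l2 with
    | nil =>
      rw [posFrom_nil]
      simp [posFrom_eq_nil_iff]
    | cons b t2 =>
      rw [posFrom_cons, posFrom_cons]
      by_cases ha : a = '-' <;> by_cases hb : b = '-'
      · simp [ha, hb, ih t2 (s+1)]
      · simp only [if_pos ha, if_neg hb, List.singleton_append, List.nil_append]
        constructor
        · intro h
          exfalso
          have hm : s ∈ posFrom (s+1) t2 := by rw [← h]; exact List.mem_cons_self
          have := mem_posFrom_ge s (s+1) t2 hm
          omega
        · rintro ⟨-, hall⟩
          exact absurd ((hall (a, b) (by simp)).1 ha) hb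
      · simp only [if_neg ha, if_pos hb, List.singleton_append, List.nil_append]
        constructor
        · intro h
          exfalso
          have hm : s ∈ posFrom (s+1) t1 := by rw [h]; exact List.mem_cons_self
          have := mem_posFrom_ge s (s+1) t1 hm
          omega
        · rintro ⟨-, hall⟩
          exact absurd ((hall (a, b) (by simp)).2 hb) ha
      · simp [ha, hb, ih t2 (s+1)]

-- A's indexed loop over range(min(len,len)) is an all-scan over the zip of the suffixes
theorem loopA_eq (l1 l2 : List Char) : ∀ (d k : Nat), min l1.length l2.length ≤ k + d →
    sdLoopA l1 l2 (PySem.List.pyRange (k : Int) ((min l1.length l2.length : Nat) : Int) 1)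
      = ((l1.drop k).zip (l2.drop k)).all (fun p => decide ((p.1 = '-') ↔ (p.2 = '-'))) := by
  intro d
  induction d with
  | zero =>
    intro k hk
    rw [PySem.List.pyRange_one_eq_nil (by exact_mod_cast by omega)]
    have hz : (l1.drop k).zip (l2.drop k) = [] := by
      rcases min_le_iff.1 (by omega : min l1.length l2.length ≤ k) with h | h
      · rw [List.drop_eq_nil_of_le h]; simp
      · rw [List.drop_eq_nil_of_le (as := l2) h]; simp
    rw [hz]
    rfl
  | succ d ih =>
    intro k hk
    by_cases hlt : k < min l1.length l2.length
    · rw [PySem.List.pyRange_one_cons (by exact_mod_cast hlt)]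
      have hk1 : k < l1.length := lt_of_lt_of_le hlt (Nat.min_le_left _ _)
      have hk2 : k < l2.length := lt_of_lt_of_le hlt (Nat.min_le_right _ _)
      have g1 : PySem.List.pyGetD l1 (k : Int) ' ' = l1[k] := by
        rw [PySem.List.pyGetD_natCast, List.getD_eq_getElem _ _ hk1]
      have g2 : PySem.List.pyGetD l2 (k : Int) ' ' = l2[k] := by
        rw [PySem.List.pyGetD_natCast, List.getD_eq_getElem _ _ hk2]
      have d1 : l1.drop k = l1[k] :: l1.drop (k+1) := List.drop_eq_getElem_cons hk1
      have d2 : l2.drop k = l2[k] :: l2.drop (k+1) := List.drop_eq_getElem_cons hk2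
      have hcast : (k : Int) + 1 = ((k + 1 : Nat) : Int) := by push_cast; ring
      simp only [sdLoopA, g1, g2, d1, d2, List.zip_cons_cons, List.all_cons, hcast,
        ih (k+1) (by omega)]
      by_cases c1 : l1[k] = '-' <;> by_cases c2 : l2[k] = '-'
      · rw [if_pos (Or.inl c1), if_neg (not_not_intro (c1.trans c2.symm))]
        simp [c1, c2]
      · have hne : l1[k] ≠ l2[k] := by rw [c1]; exact fun h => c2 h.symm
        rw [if_pos (Or.inl c1), if_pos hne]
        simp [c1, c2]
      · have hne : l1[k] ≠ l2[k] := fun h => c1 (h.trans c2)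
        rw [if_pos (Or.inr c2), if_pos hne]
        simp [c1, c2]
      · rw [if_neg (fun h => h.elim c1 c2)]
        simp [c1, c2]
    · rw [PySem.List.pyRange_one_eq_nil (by exact_mod_cast by omega)]
      have hz : (l1.drop k).zip (l2.drop k) = [] := by
        rcases min_le_iff.1 (by omega : min l1.length l2.length ≤ k) with h | h
        · rw [List.drop_eq_nil_of_le h]; simp
        · rw [List.drop_eq_nil_of_le (as := l2) h]; simp
      rw [hz]
      rfl

-- ===== VERDICT (by name: the statement is the Claim_ definition above) =====
theorem same_dashes_spec : Claim_equal_same_dashes := by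
  intro str1 str2 _
  unfold Spec_same_dashes same_dashes same_dashes_alt dashPositions
  have hc1 : PySem.Str.count str1 "-" = str1.toList.count '-' := by
    rw [PySem.Str.count_eq]; exact count_single '-' str1.toList
  have hc2 : PySem.Str.count str2 "-" = str2.toList.count '-' := by
    rw [PySem.Str.count_eq]; exact count_single '-' str2.toList
  have hb : (((PySem.List.enumerate str1.toList 0).filter (fun p => p.2 = '-')).map (·.1) ==
      ((PySem.List.enumerate str2.toList 0).filter (fun p => p.2 = '-')).map (·.1))
      = decide (posFrom 0 str1.toList = posFrom 0 str2.toList) := by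
    unfold posFrom
    by_cases h : ((PySem.List.enumerate str1.toList 0).filter (fun p => p.2 = '-')).map (·.1) =
        ((PySem.List.enumerate str2.toList 0).filter (fun p => p.2 = '-')).map (·.1) <;>
      simp [h, beq_eq_false_iff_ne]
  rw [hb, hc1, hc2]
  have hmin : min (PySem.Str.len str1) (PySem.Str.len str2)
      = ((min str1.toList.length str2.toList.length : Nat) : Int) := by
    rw [PySem.Str.len_eq, PySem.Str.len_eq]; push_cast; rfl
  by_cases hcnt : str1.toList.count '-' = str2.toList.count '-'
  · rw [if_neg (by omega)]
    have hloop := loopA_eq str1.toList str2.toList (min str1.toList.length str2.toList.length) 0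
      (by omega)
    rw [hmin]
    rw [show ((0 : Nat) : Int) = (0 : Int) by rfl] at hloop
    rw [hloop]
    simp only [List.drop_zero]
    by_cases hall : ∀ p ∈ str1.toList.zip str2.toList, ((p.1 = '-') ↔ (p.2 = '-'))
    · rw [decide_eq_true ((key str1.toList str2.toList 0).2 ⟨hcnt, hall⟩)]
      simp [List.all_eq_true]
      exact fun a b h => hall (a, b) h
    · have hne : ¬ posFrom 0 str1.toList = posFrom 0 str2.toList := by
        intro h
        exact hall ((key str1.toList str2.toList 0).1 h).2
      rw [decide_eq_false hne, List.all_eq_false]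
      rw [not_forall] at hall
      obtain ⟨p, hps⟩ := hall
      rw [Classical.not_imp] at hps
      obtain ⟨hp, hnp⟩ := hps
      exact ⟨p, hp, by simp only [decide_eq_true_eq]; exact hnp⟩
  · rw [if_pos (by omega)]
    have hne : ¬ posFrom 0 str1.toList = posFrom 0 str2.toList := by
      intro h
      exact hcnt ((key str1.toList str2.toList 0).1 h).1
    rw [decide_eq_false hne]
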